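-- pv_equiv track=rewrite | github.com/tdlib/td | tools/ci/check_cpp23_compat.py | _advance_position
-- ===== SOURCE A (Python) =====
-- def _advance_position(chunk: str, line: int, column: int) -> tuple[int, int]:
--     for character in chunk:
--         if character == "\n":
--             line += 1
--             column = 1
--         else:
--             column += 1
--     return line, column
-- ===== SOURCE B (Python) =====
-- def _advance_position(chunk: str, line: int, column: int) -> tuple[int, int]:
--     newlines = chunk.count("\n")
--     if newlines == 0:
--         return line, column + len(chunk)
--     return line + newlines, len(chunk) - chunk.rfind("\n")
-- ===== Notes on version B (the rewrite author's own statement) =====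
-- stated objective: simpler
-- what changed: Replaces the per-character loop with aggregate builtins: count('\n') gives the line delta and len(chunk) - rfind('\n') gives the final column when a newline exists.
import Mathlib
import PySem

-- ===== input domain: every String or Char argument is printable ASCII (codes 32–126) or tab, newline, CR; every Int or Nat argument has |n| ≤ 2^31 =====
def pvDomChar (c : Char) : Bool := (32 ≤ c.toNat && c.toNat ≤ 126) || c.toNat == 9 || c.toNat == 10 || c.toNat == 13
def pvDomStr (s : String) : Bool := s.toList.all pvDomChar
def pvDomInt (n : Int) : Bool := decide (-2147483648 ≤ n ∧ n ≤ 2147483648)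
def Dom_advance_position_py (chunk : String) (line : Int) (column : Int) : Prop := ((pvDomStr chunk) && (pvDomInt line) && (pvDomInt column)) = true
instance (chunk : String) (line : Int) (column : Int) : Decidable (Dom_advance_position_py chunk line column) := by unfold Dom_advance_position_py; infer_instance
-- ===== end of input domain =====

-- B replaces A's per-character loop by aggregate queries: the newline count and the index of the last newline (simpler, no loop state).

-- ===== PORT A =====
-- literal port of A: a left fold over the characters carrying the (line, column) state
def advance_position_py (chunk : String) (line : Int) (column : Int) : Int × Int :=
  chunk.toList.foldl
    (fun (st : Int × Int) character =>
      if character == '\n' then (st.1 + 1, (1 : Int)) else (st.1, st.2 + 1))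
    (line, column)

-- ===== PORT B =====
-- literal port of Source B: chunk.count("\n"), len(chunk), chunk.rfind("\n")
def advance_position_py_alt (chunk : String) (line : Int) (column : Int) : Int × Int :=
  let newlines : Nat := PySem.Str.count chunk "\n"
  if newlines = 0 then (line, column + PySem.Str.len chunk)
  else (line + (newlines : Int), PySem.Str.len chunk - PySem.Str.rfind chunk "\n")

-- ===== PRECONDITION & SPEC =====
def Spec_advance_position_py (chunk : String) (line : Int) (column : Int) (out : Int × Int) : Prop := out = advance_position_py_alt chunk line column
instance (chunk : String) (line : Int) (column : Int) (out : Int × Int) : Decidable (Spec_advance_position_py chunk line column out) := by unfold Spec_advance_position_py; infer_instance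

-- ===== CLAIM (what is proved, stated in full; the proofs are below) =====
def Claim_equal_advance_position_py : Prop := ∀ (chunk : String) (line : Int) (column : Int), Dom_advance_position_py chunk line column → Spec_advance_position_py chunk line column (advance_position_py chunk line column)

-- ===== LEMMAS AND PROOFS =====

-- count.go with a single-character needle is List.count
theorem cnt_go_single (x : Char) : ∀ (fuel : Nat) (l : List Char) (acc : Nat),
    l.length ≤ fuel → PySem.Chars.count.go [x] fuel l acc = acc + l.count x := by
  intro fuel
  induction fuel with
  | zero =>
    intro l acc h
    cases l with
    | nil => simp [PySem.Chars.count.go]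
    | cons c t => simp at h
  | succ n ih =>
    intro l acc h
    cases l with
    | nil => simp [PySem.Chars.count.go]
    | cons c t =>
      simp only [PySem.Chars.count.go, List.isPrefixOf, Bool.and_true]
      by_cases hc : c = x
      · subst hc
        simp only [BEq.rfl, if_pos]
        rw [ih _ _ (by simpa using h)]
        simp
        omega
      · have hxc : (x == c) = false := beq_eq_false_iff_ne.mpr (fun h' => hc h'.symm)
        rw [hxc]
        simp only [Bool.false_eq_true, if_false]
        rw [ih _ _ (by simpa using h)]
        simp [hc]

theorem cnt_single (l : List Char) (x : Char) : PySem.Chars.count l [x] = l.count x := by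
  unfold PySem.Chars.count
  rw [if_neg (by simp), cnt_go_single x l.length l 0 le_rfl]
  omega

-- rfind.go on a cons, index shifted by one
theorem rf_go_cons (c x : Char) (cs : List Char) : ∀ (j : Nat),
    PySem.Chars.rfind.go (c :: cs) [x] (j + 1) =
      if PySem.Chars.rfind.go cs [x] j = -1 then (if c = x then 0 else -1)
      else PySem.Chars.rfind.go cs [x] j + 1 := by
  intro j
  induction j with
  | zero =>
    simp only [PySem.Chars.rfind.go, List.drop, List.isPrefixOf, Bool.and_true]
    by_cases hp : ([x].isPrefixOf cs) = true
    · simp [hp]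
    · simp only [Bool.not_eq_true] at hp
      simp only [hp, Bool.false_eq_true, if_false]
      by_cases hc : c = x
      · subst hc; simp
      · have hxc : (x == c) = false := beq_eq_false_iff_ne.mpr (fun h' => hc h'.symm)
        simp [hxc, hc]
  | succ j ih =>
    have hL : PySem.Chars.rfind.go (c :: cs) [x] (j + 1 + 1) =
        if ([x].isPrefixOf (List.drop (j + 1) cs)) = true then ((j : Int) + 1 + 1)
        else PySem.Chars.rfind.go (c :: cs) [x] (j + 1) := by
      simp only [PySem.Chars.rfind.go]
      norm_num [List.drop_succ_cons]
    have hR : PySem.Chars.rfind.go cs [x] (j + 1) =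
        if ([x].isPrefixOf (List.drop (j + 1) cs)) = true then ((j : Int) + 1)
        else PySem.Chars.rfind.go cs [x] j := by
      simp only [PySem.Chars.rfind.go]
      norm_num
    by_cases hp : ([x].isPrefixOf (List.drop (j + 1) cs)) = true
    · rw [hL, hR, if_pos hp, if_pos hp, if_neg (by omega)]
    · rw [hL, hR, if_neg hp, if_neg hp, ih]

theorem rf_cons (c x : Char) (cs : List Char) :
    PySem.Chars.rfind (c :: cs) [x] =
      if PySem.Chars.rfind cs [x] = -1 then (if c = x then 0 else -1)
      else PySem.Chars.rfind cs [x] + 1 := by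
  unfold PySem.Chars.rfind
  simpa using rf_go_cons c x cs cs.length

theorem rf_nil (x : Char) : PySem.Chars.rfind [] [x] = -1 := by
  simp [PySem.Chars.rfind, PySem.Chars.rfind.go, List.isPrefixOf]

theorem rf_ge (x : Char) : ∀ (cs : List Char), -1 ≤ PySem.Chars.rfind cs [x] := by
  intro cs
  induction cs with
  | nil => rw [rf_nil]
  | cons c t ih =>
    rw [rf_cons]
    split_ifs <;> omega

-- last-newline index is -1 exactly when the character does not occur
theorem rf_neg_one_iff (x : Char) : ∀ (cs : List Char),
    (PySem.Chars.rfind cs [x] = -1 ↔ cs.count x = 0) := by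
  intro cs
  induction cs with
  | nil => simp [rf_nil]
  | cons c t ih =>
    rw [rf_cons]
    by_cases h1 : PySem.Chars.rfind t [x] = -1
    · rw [if_pos h1]
      by_cases hc : c = x
      · simp [hc]
      · simp [hc, ih.mp h1]
    · rw [if_neg h1]
      have hge := rf_ge x t
      constructor
      · intro h; omega
      · intro h
        have h2 : t.count x = 0 := by
          rw [List.count_cons] at h
          split_ifs at h <;> omega
        exact absurd (ih.mpr h2) h1

-- the per-character fold equals the aggregate formula
theorem fold_formula (x : Char) : ∀ (cs : List Char) (line column : Int),
    cs.foldl (fun (st : Int × Int) character =>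
        if character == x then (st.1 + 1, (1 : Int)) else (st.1, st.2 + 1)) (line, column) =
      if cs.count x = 0 then (line, column + cs.length)
      else (line + (cs.count x : Int), (cs.length : Int) - PySem.Chars.rfind cs [x]) := by
  intro cs
  induction cs with
  | nil => simp
  | cons c t ih =>
    intro line column
    simp only [List.foldl_cons]
    by_cases hc : c = x
    · subst hc
      simp only [BEq.rfl, if_pos]
      rw [ih]
      have hcnt : (c :: t).count c = t.count c + 1 := by simp
      rw [rf_cons c c t, if_pos rfl]
      by_cases h0 : t.count c = 0
      · rw [if_pos h0, if_neg (by omega), if_pos ((rf_neg_one_iff c t).mpr h0), hcnt, h0]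
        simp only [Prod.mk.injEq, List.length_cons]
        constructor <;> (push_cast; try ring)
      · rw [if_neg h0, if_neg (by omega),
          if_neg (fun h => h0 ((rf_neg_one_iff c t).mp h)), hcnt]
        simp only [Prod.mk.injEq, List.length_cons]
        constructor <;> (push_cast; try ring)
    · have hbeq : (c == x) = false := beq_eq_false_iff_ne.mpr hc
      rw [hbeq]
      simp only [Bool.false_eq_true, if_false]
      rw [ih]
      have hcnt : (c :: t).count x = t.count x := by simp [hc]
      rw [rf_cons c x t, hcnt]
      by_cases h0 : t.count x = 0
      · rw [if_pos h0, if_pos h0]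
        simp only [Prod.mk.injEq, List.length_cons]
        constructor <;> (push_cast; try ring)
      · rw [if_neg h0, if_neg h0,
          if_neg (fun h => h0 ((rf_neg_one_iff x t).mp h))]
        simp only [Prod.mk.injEq, List.length_cons]
        constructor <;> (push_cast; try ring)

-- ===== VERDICT (by name: the statement is the Claim_ definition above) =====
theorem advance_position_py_spec : Claim_equal_advance_position_py := by
  intro chunk line column _
  unfold Spec_advance_position_py advance_position_py advance_position_py_alt
  have hlist : ("\n" : String).toList = ['\n'] := by decide
  simp only [PySem.Str.count_eq, PySem.Str.rfind_eq, PySem.Str.len_eq, hlist,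
    cnt_single]
  rw [fold_formula '\n' chunk.toList line column]
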